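-- pv_equiv track=rewrite | github.com/Ivan-reload/12- | 12-25024.py | f
-- ===== SOURCE A (Python) =====
-- def f(pos, l, q):
--     if pos < 0:
--         return ''.join(l)
--
--     n = l[pos]
--     if q == 1:
--         if n == '0': l[pos], q = '1', 2
--         elif n  == '1': l[pos], q = '0', 2
--
--     elif q == 2:
--         if n == '0': l[pos], q = '1', 3
--         elif n == '1': l[pos], q = '0', 2
--
--     elif q == 3:
--         if n == '0': l[pos], q = '0', 2
--         elif n == '1': l[pos], q = '1', 3
--
--     return f(pos-1, l, q)
-- ===== SOURCE B (Python) =====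
-- # B: iterative, table-driven rewrite of A's recursive branch chain; mutates l in place like A.
-- TRANS = {
--     (1, '0'): ('1', 2), (1, '1'): ('0', 2),
--     (2, '0'): ('1', 3), (2, '1'): ('0', 2),
--     (3, '0'): ('0', 2), (3, '1'): ('1', 3),
-- }
--
-- def f(pos, l, q):
--     for i in range(pos, -1, -1):
--         key = (q, l[i])
--         if key in TRANS:
--             l[i], q = TRANS[key]
--     return ''.join(l)
-- ===== Notes on version B (the rewrite author's own statement) =====
-- stated objective: alternative
-- what changed: A's tail recursion with an inlined three-branch (q=1/2/3) if/elif chain is replaced by an iterative countdown for-loop driven by a precomputed transition-table dict keyed by (state, symbol).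
import Mathlib
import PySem

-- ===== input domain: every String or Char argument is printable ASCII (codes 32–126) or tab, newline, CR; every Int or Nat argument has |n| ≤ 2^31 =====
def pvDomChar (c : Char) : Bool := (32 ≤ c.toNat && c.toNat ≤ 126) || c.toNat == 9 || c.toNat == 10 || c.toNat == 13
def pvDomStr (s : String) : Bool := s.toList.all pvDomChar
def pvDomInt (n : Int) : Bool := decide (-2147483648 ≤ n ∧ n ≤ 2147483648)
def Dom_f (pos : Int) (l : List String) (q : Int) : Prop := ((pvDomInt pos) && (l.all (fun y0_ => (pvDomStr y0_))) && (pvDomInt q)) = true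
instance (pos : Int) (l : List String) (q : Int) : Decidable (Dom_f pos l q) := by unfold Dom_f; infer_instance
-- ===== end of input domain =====

-- B rewrites A's tail recursion with an inlined 3-state branch chain as an iterative
-- countdown loop driven by a transition TABLE; equivalence is about the return value
-- (both Pythons also mutate l in place identically).

-- ===== PORT A =====
def f (pos : Int) (l : List String) (q : Int) : String :=
  if pos < 0 then PySem.Str.join "" l
  else
    match PySem.List.pyGet? l pos with
    | none => ""  -- IndexError in Python; excluded by Pre_f
    | some n =>
      if q = 1 then
        if n = "0" then f (pos - 1) (l.set pos.toNat "1") 2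
        else if n = "1" then f (pos - 1) (l.set pos.toNat "0") 2
        else f (pos - 1) l q
      else if q = 2 then
        if n = "0" then f (pos - 1) (l.set pos.toNat "1") 3
        else if n = "1" then f (pos - 1) (l.set pos.toNat "0") 2
        else f (pos - 1) l q
      else if q = 3 then
        if n = "0" then f (pos - 1) (l.set pos.toNat "0") 2
        else if n = "1" then f (pos - 1) (l.set pos.toNat "1") 3
        else f (pos - 1) l q
      else f (pos - 1) l q
termination_by (pos + 1).toNat
decreasing_by all_goals omega

-- ===== PORT B =====
-- the module-level TRANS dict of Source B
def pvTrans : PySem.Dict (Int × String) (String × Int) :=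
  PySem.Dict.ofList
    [((1, "0"), ("1", 2)), ((1, "1"), ("0", 2)),
     ((2, "0"), ("1", 3)), ((2, "1"), ("0", 2)),
     ((3, "0"), ("0", 2)), ((3, "1"), ("1", 3))]

def f_alt (pos : Int) (l : List String) (q : Int) : String :=
  let st := (PySem.List.pyRange pos (-1) (-1)).foldl
    (fun (st : List String × Int) i =>
      match PySem.List.pyGet? st.1 i with
      | none => st   -- IndexError in Python; excluded by Pre_f
      | some n =>
        match pvTrans.get? (st.2, n) with
        | some cq => (st.1.set i.toNat cq.1, cq.2)
        | none => st)
    (l, q)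
  PySem.Str.join "" st.1

-- ===== PRECONDITION & SPEC =====
-- Pre_f excludes exactly the inputs where Python A raises IndexError (pos ≥ len(l)).
def Pre_f (pos : Int) (l : List String) (_q : Int) : Prop := pos < (l.length : Int)
instance (pos : Int) (l : List String) (q : Int) : Decidable (Pre_f pos l q) := by unfold Pre_f; infer_instance
def pvWitness_f : Int × List String × Int := (2, ["0", "1", "0"], 2)

def Spec_f (pos : Int) (l : List String) (q : Int) (out : String) : Prop := out = f_alt pos l q
instance (pos : Int) (l : List String) (q : Int) (out : String) : Decidable (Spec_f pos l q out) := by unfold Spec_f; infer_instance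

-- ===== CLAIM (what is proved, stated in full; the proofs are below) =====
def Claim_equal_f : Prop := ∀ (pos : Int) (l : List String) (q : Int), Dom_f pos l q → Pre_f pos l q → Spec_f pos l q (f pos l q)

-- ===== LEMMAS AND PROOFS =====

-- how pvTrans looks up an arbitrary state/symbol pair
theorem pvTrans_get (q : Int) (n : String) :
    pvTrans.get? (q, n) =
      if q = 1 ∧ n = "0" then some ("1", 2)
      else if q = 1 ∧ n = "1" then some ("0", 2)
      else if q = 2 ∧ n = "0" then some ("1", 3)
      else if q = 2 ∧ n = "1" then some ("0", 2)
      else if q = 3 ∧ n = "0" then some ("0", 2)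
      else if q = 3 ∧ n = "1" then some ("1", 3)
      else none := by
  have h : pvTrans = PySem.Dict.mk
    [((1, "0"), ("1", 2)), ((1, "1"), ("0", 2)),
     ((2, "0"), ("1", 3)), ((2, "1"), ("0", 2)),
     ((3, "0"), ("0", 2)), ((3, "1"), ("1", 3))] := by decide
  rw [h]
  simp only [PySem.Dict.get?_mk_cons, beq_iff_eq, Prod.mk.injEq]
  have hnil : (PySem.Dict.mk ([] : List ((Int × String) × (String × Int)))).get? (q, n) = none := rfl
  rw [hnil]
  simp only [@eq_comm ℤ 1 q, @eq_comm ℤ 2 q, @eq_comm ℤ 3 q,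
    @eq_comm String "0" n, @eq_comm String "1" n]

-- one unfolding of B's loop when pos is a valid index
theorem f_alt_step (pos : Int) (l : List String) (q : Int)
    (h0 : 0 ≤ pos) (h1 : pos < (l.length : Int)) :
    f_alt pos l q =
      match pvTrans.get? (q, l[pos.toNat]'(by omega)) with
      | some cq => f_alt (pos - 1) (l.set pos.toNat cq.1) cq.2
      | none => f_alt (pos - 1) l q := by
  have hget : PySem.List.pyGet? l pos = some (l[pos.toNat]'(by omega)) :=
    PySem.List.pyGet?_eq_some_getElem l h0 (by omega)
  rw [show f_alt pos l q = PySem.Str.join "" (((PySem.List.pyRange pos (-1) (-1)).foldl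
    (fun (st : List String × Int) i =>
      match PySem.List.pyGet? st.1 i with
      | none => st
      | some n =>
        match pvTrans.get? (st.2, n) with
        | some cq => (st.1.set i.toNat cq.1, cq.2)
        | none => st)
    (l, q)).1) from rfl]
  rw [PySem.List.pyRange_neg_one_cons (by omega : (-1 : Int) < pos)]
  simp only [List.foldl_cons, hget]
  cases hc : pvTrans.get? (q, l[pos.toNat]'(by omega)) with
  | none => rfl
  | some cq => rfl

theorem f_alt_neg (pos : Int) (l : List String) (q : Int) (h : pos < 0) :
    f_alt pos l q = PySem.Str.join "" l := by
  simp [f_alt, PySem.List.pyRange_neg_one_eq_nil (by omega : pos ≤ -1)]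

theorem main_eq (k : Nat) : ∀ (pos : Int) (l : List String) (q : Int),
    (pos + 1).toNat ≤ k → pos < (l.length : Int) → f pos l q = f_alt pos l q := by
  induction k with
  | zero =>
    intro pos l q hk hlen
    have hneg : pos < 0 := by omega
    rw [f, if_pos hneg, f_alt_neg pos l q hneg]
  | succ k ih =>
    intro pos l q hk hlen
    by_cases hneg : pos < 0
    · rw [f, if_pos hneg, f_alt_neg pos l q hneg]
    · have h0 : (0 : Int) ≤ pos := by omega
      have H : ∀ (l' : List String) (q' : Int), l'.length = l.length →
          f (pos - 1) l' q' = f_alt (pos - 1) l' q' := by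
        intro l' q' hl'
        exact ih (pos - 1) l' q' (by omega) (by rw [hl']; omega)
      have hget : PySem.List.pyGet? l pos = some (l[pos.toNat]'(by omega)) :=
        PySem.List.pyGet?_eq_some_getElem l h0 (by omega)
      rw [f_alt_step pos l q h0 hlen, pvTrans_get, f, if_neg hneg, hget]
      generalize l[pos.toNat]'(by omega) = n
      by_cases hq1 : q = 1
      · subst hq1
        by_cases hn0 : n = "0"
        · subst hn0; norm_num; exact H _ _ (by simp)
        · by_cases hn1 : n = "1"
          · subst hn1; norm_num; exact H _ _ (by simp)
          · norm_num [hn0, hn1]; exact H _ _ rfl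
      · by_cases hq2 : q = 2
        · subst hq2
          by_cases hn0 : n = "0"
          · subst hn0; norm_num; exact H _ _ (by simp)
          · by_cases hn1 : n = "1"
            · subst hn1; norm_num; exact H _ _ (by simp)
            · norm_num [hn0, hn1]; exact H _ _ rfl
        · by_cases hq3 : q = 3
          · subst hq3
            by_cases hn0 : n = "0"
            · subst hn0; norm_num; exact H _ _ (by simp)
            · by_cases hn1 : n = "1"
              · subst hn1; norm_num; exact H _ _ (by simp)
              · norm_num [hn0, hn1]; exact H _ _ rfl
          · norm_num [hq1, hq2, hq3]; exact H _ _ rfl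

-- ===== VERDICT (by name: the statement is the Claim_ definition above) =====
theorem f_spec : Claim_equal_f := by
  intro pos l q _ hpre
  exact main_eq (pos + 1).toNat pos l q le_rfl hpre
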